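-- pv_equiv track=rewrite | github.com/jiazeyu1987/ASDF | data_structrue/impress_area/impress_main.py | mark_head
-- ===== SOURCE A (Python) =====
-- def mark_head(row):
--     arr = []
--     for i in range(len(row)):
--         if(row[i][2]==0):
--             arr.append(row[i])
--         else:
--             break
--     return arr
-- ===== SOURCE B (Python) =====
-- def mark_head(row):
--     cut = next((i for i, r in enumerate(row) if r[2] != 0), len(row))
--     return row[:cut]
-- ===== Notes on version B (the rewrite author's own statement) =====
-- stated objective: alternative
-- what changed: Instead of an index loop that appends elements one by one until a break, B works in two stages: it first locates the cut index (the first position whose third field is nonzero, defaulting to len(row)) and then returns the single slice row[:cut], so no accumulator list is built element by element.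
import Mathlib
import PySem

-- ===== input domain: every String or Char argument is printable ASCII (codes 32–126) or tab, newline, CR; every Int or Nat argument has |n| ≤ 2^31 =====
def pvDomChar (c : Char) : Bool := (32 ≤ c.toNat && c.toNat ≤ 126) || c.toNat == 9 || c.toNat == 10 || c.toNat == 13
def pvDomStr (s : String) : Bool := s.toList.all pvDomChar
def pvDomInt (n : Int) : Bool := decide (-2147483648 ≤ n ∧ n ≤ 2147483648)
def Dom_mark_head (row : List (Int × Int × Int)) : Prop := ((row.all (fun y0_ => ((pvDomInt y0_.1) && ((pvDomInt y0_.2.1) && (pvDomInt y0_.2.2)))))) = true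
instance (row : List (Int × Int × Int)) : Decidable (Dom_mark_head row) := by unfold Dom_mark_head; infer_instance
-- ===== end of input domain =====

-- B replaces A's append-until-break index loop by two stages: find the cut index, then slice; objective: alternative.

-- ===== PORT A =====
-- index loop 'for i in range(len(row))' with accumulator arr and break, as structural
-- recursion on the index; terminates on 'row.length - i'
def mark_head_loop (row : List (Int × Int × Int)) (i : Nat) (arr : List (Int × Int × Int)) :
    List (Int × Int × Int) :=
  if h : i < row.length then
    if row[i].2.2 == 0 then
      mark_head_loop row (i + 1) (arr ++ [row[i]])
    else
      arr
  else arr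
termination_by row.length - i

def mark_head (row : List (Int × Int × Int)) : List (Int × Int × Int) :=
  mark_head_loop row 0 []

-- ===== PORT B =====
-- cut = next((i for i, r in enumerate(row) if r[2] != 0), len(row)); return row[:cut]
-- List.findIdx returns row.length when no element matches, exactly the 'next' default;
-- row[:cut] with 0 ≤ cut ≤ len(row) is List.take cut.
def mark_head_alt (row : List (Int × Int × Int)) : List (Int × Int × Int) :=
  row.take (row.findIdx (fun r => r.2.2 != 0))

-- ===== PRECONDITION & SPEC =====
def Spec_mark_head (row : List (Int × Int × Int)) (out : List (Int × Int × Int)) : Prop := out = mark_head_alt row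
instance (row : List (Int × Int × Int)) (out : List (Int × Int × Int)) : Decidable (Spec_mark_head row out) := by unfold Spec_mark_head; infer_instance

-- ===== CLAIM (what is proved, stated in full; the proofs are below) =====
def Claim_equal_mark_head : Prop := ∀ (row : List (Int × Int × Int)), Dom_mark_head row → Spec_mark_head row (mark_head row)

-- ===== LEMMAS AND PROOFS =====
theorem mark_head_loop_eq (row : List (Int × Int × Int)) (i : Nat) (arr : List (Int × Int × Int)) :
    mark_head_loop row i arr = arr ++ (row.drop i).takeWhile (fun r => r.2.2 == 0) := by
  induction i, arr using mark_head_loop.induct row with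
  | case1 i arr h htrue ih =>
    rw [mark_head_loop, dif_pos h, if_pos htrue, ih]
    have hdrop : row.drop i = row[i] :: row.drop (i + 1) := List.drop_eq_getElem_cons h
    rw [hdrop, List.takeWhile_cons, if_pos htrue]
    simp
  | case2 i arr h hfalse =>
    rw [mark_head_loop, dif_pos h, if_neg hfalse]
    have hdrop : row.drop i = row[i] :: row.drop (i + 1) := List.drop_eq_getElem_cons h
    rw [hdrop, List.takeWhile_cons, if_neg hfalse]
    simp
  | case3 i arr h =>
    rw [mark_head_loop, dif_neg h]
    have : row.drop i = [] := List.drop_eq_nil_of_le (by omega)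
    simp [this]

theorem takeWhile_eq_take_findIdx (row : List (Int × Int × Int)) :
    row.takeWhile (fun r => r.2.2 == 0) = row.take (row.findIdx (fun r => r.2.2 != 0)) := by
  induction row with
  | nil => rfl
  | cons x xs ih =>
    by_cases hx : x.2.2 = 0
    · simp [List.findIdx_cons, hx, ih]
    · have hb : (x.2.2 != 0) = true := by simp [bne_iff_ne, hx]
      simp [List.findIdx_cons, hb]
      exact hx

-- ===== VERDICT (by name: the statement is the Claim_ definition above) =====
theorem mark_head_spec : Claim_equal_mark_head := by
  intro row _
  unfold Spec_mark_head mark_head mark_head_alt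
  rw [mark_head_loop_eq, ← takeWhile_eq_take_findIdx]
  simp
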